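-- pv_equiv track=rewrite | github.com/amirkadri46/Clue-AI | app.py | _parse_standard_tasks
-- ===== SOURCE A (Python) =====
-- from typing import Dict, List, Tuple, Optional
--
-- def _parse_standard_tasks(tasks_text: str) -> Tuple[List[Dict], str]:
--     tasks_data = []
--     lines = tasks_text.strip().split('\n')
--     current_task = {}
--
--     for line in lines:
--         if line.startswith("Task:"):
--             if current_task:
--                 tasks_data.append(current_task)
--             current_task = {"Task": line[5:].strip(), "Deadline": "None", "Responsible": "None"}
--         elif line.startswith("Deadline:") and current_task:
--             current_task["Deadline"] = line[9:].strip()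
--         elif line.startswith("Responsible:") and current_task:
--             current_task["Responsible"] = line[12:].strip()
--
--     if current_task:
--         tasks_data.append(current_task)
--
--     bullet_points = ""
--     for task in tasks_data:
--         bullet_points += f"  *Task: {task['Task']}\n\n"
--         bullet_points += f"  *Deadline: {task['Deadline']}\n\n"
--         bullet_points += f"  *Responsible: {task['Responsible']}\n\n"
--
--     return tasks_data, bullet_points if bullet_points else "No tasks extracted."
-- ===== SOURCE B (Python) =====
-- from typing import Dict, List, Tuple
--
--
-- def _last_field(body, prefix, n):
--     vals = [l[n:].strip() for l in body if l.startswith(prefix)]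
--     return vals[-1] if vals else "None"
--
--
-- def _parse_standard_tasks(tasks_text: str) -> Tuple[List[Dict], str]:
--     lines = tasks_text.strip().split('\n')
--     # partition into blocks: each block = one "Task:" header line + its following lines
--     blocks = []
--     i, n = 0, len(lines)
--     while i < n:
--         if lines[i].startswith("Task:"):
--             j = i + 1
--             while j < n and not lines[j].startswith("Task:"):
--                 j += 1
--             blocks.append((lines[i], lines[i + 1:j]))
--             i = j
--         else:
--             i += 1
--     tasks_data = [{"Task": header[5:].strip(),
--                    "Deadline": _last_field(body, "Deadline:", 9),
--                    "Responsible": _last_field(body, "Responsible:", 12)}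
--                   for header, body in blocks]
--     bullets = "".join(
--         f"  *Task: {d['Task']}\n\n  *Deadline: {d['Deadline']}\n\n  *Responsible: {d['Responsible']}\n\n"
--         for d in tasks_data)
--     return tasks_data, bullets if bullets else "No tasks extracted."
-- ===== Notes on version B (the rewrite author's own statement) =====
-- stated objective: alternative
-- what changed: Replaces A's single stateful line loop (mutable current-task dict appended on each new header) by a staged pipeline: partition the lines into Task-headed blocks, map each block to its dict with last-wins field extraction, then join per-task bullet chunks.
import Mathlib
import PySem

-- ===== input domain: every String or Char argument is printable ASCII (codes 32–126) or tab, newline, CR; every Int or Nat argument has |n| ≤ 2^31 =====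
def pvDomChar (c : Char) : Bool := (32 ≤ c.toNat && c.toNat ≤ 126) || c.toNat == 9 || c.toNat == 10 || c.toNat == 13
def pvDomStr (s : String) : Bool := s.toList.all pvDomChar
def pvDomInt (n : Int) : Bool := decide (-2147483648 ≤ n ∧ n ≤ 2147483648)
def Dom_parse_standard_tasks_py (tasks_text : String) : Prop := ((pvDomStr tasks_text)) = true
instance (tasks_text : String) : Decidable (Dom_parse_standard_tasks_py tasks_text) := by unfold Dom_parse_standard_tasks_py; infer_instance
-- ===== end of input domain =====

-- B replaces A's single stateful loop with a staged pipeline (partition into blocks, map to dicts, join chunks); same cost, alternative decomposition.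

-- ===== PORT A =====
def pvStepA (st : (List (List (String × String))) × List (String × String)) (line : String) :
    (List (List (String × String))) × List (String × String) :=
  if PySem.Str.startswith line "Task:" then
    ((if st.2.isEmpty then st.1 else st.1 ++ [st.2]),
     [("Task", PySem.Str.strip (PySem.Str.slice line (some 5) none)),
      ("Deadline", "None"), ("Responsible", "None")])
  else if PySem.Str.startswith line "Deadline:" && !st.2.isEmpty then
    (st.1, ((PySem.Dict.mk st.2).insert "Deadline" (PySem.Str.strip (PySem.Str.slice line (some 9) none))).items)
  else if PySem.Str.startswith line "Responsible:" && !st.2.isEmpty then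
    (st.1, ((PySem.Dict.mk st.2).insert "Responsible" (PySem.Str.strip (PySem.Str.slice line (some 12) none))).items)
  else st

def parse_standard_tasks_py (tasks_text : String) : (List (List (String × String))) × String :=
  let lines := (PySem.Str.split? (PySem.Str.strip tasks_text) "\n").getD []
  let st := lines.foldl pvStepA ([], [])
  let tasks_data := if st.2.isEmpty then st.1 else st.1 ++ [st.2]
  let bullets := tasks_data.foldl (fun acc t =>
      ((acc ++ ("  *Task: " ++ (PySem.Dict.mk t).getD "Task" "" ++ "\n\n"))
           ++ ("  *Deadline: " ++ (PySem.Dict.mk t).getD "Deadline" "" ++ "\n\n"))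
           ++ ("  *Responsible: " ++ (PySem.Dict.mk t).getD "Responsible" "" ++ "\n\n")) ""
  (tasks_data, if bullets = "" then "No tasks extracted." else bullets)

-- ===== PORT B =====
def pvNotTask (l : String) : Bool := !PySem.Str.startswith l "Task:"

def pvBlocks : List String → List (String × List String)
  | [] => []
  | l :: ls =>
    if PySem.Str.startswith l "Task:" then
      (l, ls.takeWhile pvNotTask) :: pvBlocks (ls.dropWhile pvNotTask)
    else pvBlocks ls
termination_by ls => ls.length
decreasing_by
  · exact Nat.lt_succ_of_le (List.length_dropWhile_le _ _)
  · simp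

def pvLastField (body : List String) (pre : String) (n : Int) : String :=
  ((body.filterMap (fun l =>
      if PySem.Str.startswith l pre then some (PySem.Str.strip (PySem.Str.slice l (some n) none))
      else none)).getLast?).getD "None"

def pvMkDict (b : String × List String) : List (String × String) :=
  [("Task", PySem.Str.strip (PySem.Str.slice b.1 (some 5) none)),
   ("Deadline", pvLastField b.2 "Deadline:" 9),
   ("Responsible", pvLastField b.2 "Responsible:" 12)]

def pvChunk (d : List (String × String)) : String :=
  "  *Task: " ++ (PySem.Dict.mk d).getD "Task" "" ++ "\n\n  *Deadline: " ++
    (PySem.Dict.mk d).getD "Deadline" "" ++ "\n\n  *Responsible: " ++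
    (PySem.Dict.mk d).getD "Responsible" "" ++ "\n\n"

def parse_standard_tasks_py_alt (tasks_text : String) : (List (List (String × String))) × String :=
  let lines := (PySem.Str.split? (PySem.Str.strip tasks_text) "\n").getD []
  let tasks_data := (pvBlocks lines).map pvMkDict
  let bullets := PySem.Str.join "" (tasks_data.map pvChunk)
  (tasks_data, if bullets = "" then "No tasks extracted." else bullets)

-- ===== PRECONDITION & SPEC =====
def Spec_parse_standard_tasks_py (tasks_text : String) (out : (List (List (String × String))) × String) : Prop := out = parse_standard_tasks_py_alt tasks_text
instance (tasks_text : String) (out : (List (List (String × String))) × String) : Decidable (Spec_parse_standard_tasks_py tasks_text out) := by unfold Spec_parse_standard_tasks_py; infer_instance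

-- ===== CLAIM =====
def Claim_equal_parse_standard_tasks_py : Prop := ∀ (tasks_text : String), Dom_parse_standard_tasks_py tasks_text → Spec_parse_standard_tasks_py tasks_text (parse_standard_tasks_py tasks_text)

-- ===== LEMMAS AND PROOFS =====
def pvTri (t d r : String) : List (String × String) :=
  [("Task", t), ("Deadline", d), ("Responsible", r)]

def pvFin (st : (List (List (String × String))) × List (String × String)) :
    List (List (String × String)) :=
  if st.2.isEmpty then st.1 else st.1 ++ [st.2]

def pvLastD (body : List String) (pre : String) (n : Int) (dflt : String) : String :=
  body.foldl (fun acc l =>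
    if PySem.Str.startswith l pre then PySem.Str.strip (PySem.Str.slice l (some n) none) else acc) dflt

lemma pvGetLastD_cons (x : String) (xs : List String) (d : String) :
    ((x :: xs).getLast?).getD d = (xs.getLast?).getD x := by
  cases xs with
  | nil => simp
  | cons y ys =>
      rw [List.getLast?_cons_cons]
      cases h : (y :: ys).getLast? with
      | none => simp at h
      | some v => simp

lemma pvLastField_eq (body : List String) (pre : String) (n : Int) :
    pvLastField body pre n = pvLastD body pre n "None" := by
  suffices h : ∀ dflt, ((body.filterMap (fun l =>
      if PySem.Str.startswith l pre then some (PySem.Str.strip (PySem.Str.slice l (some n) none))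
      else none)).getLast?).getD dflt = pvLastD body pre n dflt from h "None"
  induction body with
  | nil => intro dflt; simp [pvLastD]
  | cons l ls ih =>
      intro dflt
      by_cases h : PySem.Str.startswith l pre = true
      · have h2 : PySem.Chars.startswith l.toList pre.toList = true := by simpa using h
        simp only [List.filterMap_cons, PySem.Str.startswith_eq, h2, if_pos]
        simp only [PySem.Str.startswith_eq] at ih
        rw [pvGetLastD_cons, ih]
        simp [pvLastD, PySem.Str.startswith_eq, h2]
      · have h2 : PySem.Chars.startswith l.toList pre.toList = false := by simpa using h
        simp only [List.filterMap_cons, PySem.Str.startswith_eq, h2, Bool.false_eq_true, if_false]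
        simp only [PySem.Str.startswith_eq] at ih
        rw [ih]
        simp [pvLastD, PySem.Str.startswith_eq, h2]

lemma pvDisjointDR (l : String) (h : PySem.Str.startswith l "Deadline:" = true) :
    PySem.Str.startswith l "Responsible:" = false := by
  rw [PySem.Str.startswith_eq] at h ⊢
  rw [PySem.Chars.startswith_iff] at h
  have hn : ¬ ("Responsible:".toList <+: l.toList) := by
    intro h2
    obtain ⟨t1, e1⟩ := h
    obtain ⟨t2, e2⟩ := h2
    rw [← e1] at e2
    simp at e2
  exact Bool.eq_false_iff.mpr (fun hh => hn ((PySem.Chars.startswith_iff _ _).mp hh))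

lemma pvFoldA_tri (ls : List String) (acc : List (List (String × String))) (t d r : String) :
    pvFin (ls.foldl pvStepA (acc, pvTri t d r)) =
      acc ++ pvTri t (pvLastD (ls.takeWhile pvNotTask) "Deadline:" 9 d)
                     (pvLastD (ls.takeWhile pvNotTask) "Responsible:" 12 r)
          :: (pvBlocks (ls.dropWhile pvNotTask)).map pvMkDict := by
  induction ls generalizing acc t d r with
  | nil => simp [pvFin, pvTri, pvLastD, pvBlocks]
  | cons l ls ih =>
      by_cases hT : PySem.Str.startswith l "Task:" = true
      · simp at hT
        have hnt : pvNotTask l = false := by simp [pvNotTask, hT]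
        have hstep : pvStepA (acc, pvTri t d r) l
            = (acc ++ [pvTri t d r],
               pvTri (PySem.Str.strip (PySem.Str.slice l (some 5) none)) "None" "None") := by
          simp [pvStepA, hT, pvTri]
        rw [List.foldl_cons, hstep, ih]
        simp [pvBlocks, hT, hnt, pvMkDict, pvLastField_eq, pvTri, pvLastD, List.append_assoc]
      · simp at hT
        have hnt : pvNotTask l = true := by simp [pvNotTask, hT]
        by_cases hD : PySem.Str.startswith l "Deadline:" = true
        · have hR : PySem.Chars.startswith l.toList
              ['R','e','s','p','o','n','s','i','b','l','e',':'] = false := by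
            simpa using pvDisjointDR l hD
          simp at hD
          have hstep : pvStepA (acc, pvTri t d r) l
              = (acc, pvTri t (PySem.Str.strip (PySem.Str.slice l (some 9) none)) r) := by
            simp [pvStepA, hT, hD, pvTri, PySem.Dict.insert, PySem.Dict.contains]
          rw [List.foldl_cons, hstep, ih]
          simp [hnt, pvLastD, hD, hR]
        · simp at hD
          by_cases hRR : PySem.Str.startswith l "Responsible:" = true
          · simp at hRR
            have hstep : pvStepA (acc, pvTri t d r) l
                = (acc, pvTri t d (PySem.Str.strip (PySem.Str.slice l (some 12) none))) := by
              simp [pvStepA, hT, hD, hRR, pvTri, PySem.Dict.insert, PySem.Dict.contains]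
            rw [List.foldl_cons, hstep, ih]
            simp [hnt, pvLastD, hD, hRR]
          · simp at hRR
            have hstep : pvStepA (acc, pvTri t d r) l = (acc, pvTri t d r) := by
              simp [pvStepA, hT, hD, hRR]
            rw [List.foldl_cons, hstep, ih]
            simp [hnt, pvLastD, hD, hRR]

lemma pvFoldA_empty (ls : List String) (acc : List (List (String × String))) :
    pvFin (ls.foldl pvStepA (acc, [])) = acc ++ (pvBlocks ls).map pvMkDict := by
  induction ls generalizing acc with
  | nil => simp [pvFin, pvBlocks]
  | cons l ls ih =>
      by_cases hT : PySem.Str.startswith l "Task:" = true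
      · simp at hT
        have hstep : pvStepA (acc, ([] : List (String × String))) l
            = (acc, pvTri (PySem.Str.strip (PySem.Str.slice l (some 5) none)) "None" "None") := by
          simp [pvStepA, hT, pvTri]
        rw [List.foldl_cons, hstep, pvFoldA_tri]
        simp [pvBlocks, hT, pvMkDict, pvLastField_eq, pvTri]
      · simp at hT
        have hstep : pvStepA (acc, ([] : List (String × String))) l = (acc, []) := by
          simp [pvStepA, hT]
        rw [List.foldl_cons, hstep, ih]
        simp [pvBlocks, hT]

lemma pvJoinNilCons (c : String) (cs : List String) :
    PySem.Str.join "" (c :: cs) = c ++ PySem.Str.join "" cs := by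
  rw [← String.toList_inj]
  cases cs with
  | nil =>
      simp [PySem.Str.toList_join, PySem.Chars.join_singleton, PySem.Chars.join_nil,
        String.toList_append]
  | cons b bs =>
      simp [PySem.Str.toList_join, PySem.Chars.join_cons_cons, String.toList_append]

lemma pvEmptyAppend (x : String) : ("" : String) ++ x = x := by
  rw [← String.toList_inj]
  simp

lemma pvBullets (ts : List (List (String × String))) (s : String) :
    ts.foldl (fun acc t =>
      ((acc ++ ("  *Task: " ++ (PySem.Dict.mk t).getD "Task" "" ++ "\n\n"))
           ++ ("  *Deadline: " ++ (PySem.Dict.mk t).getD "Deadline" "" ++ "\n\n"))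
           ++ ("  *Responsible: " ++ (PySem.Dict.mk t).getD "Responsible" "" ++ "\n\n")) s
    = s ++ PySem.Str.join "" (ts.map pvChunk) := by
  induction ts generalizing s with
  | nil =>
      rw [← String.toList_inj]
      simp [PySem.Str.toList_join, PySem.Chars.join_nil, String.toList_append]
  | cons t ts ih =>
      rw [List.foldl_cons, ih, List.map_cons, pvJoinNilCons]
      rw [← String.toList_inj]
      have e1 : ("\n\n  *Deadline: " : String).toList
          = ("\n\n" : String).toList ++ ("  *Deadline: " : String).toList := by decide
      have e2 : ("\n\n  *Responsible: " : String).toList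
          = ("\n\n" : String).toList ++ ("  *Responsible: " : String).toList := by decide
      simp [String.toList_append, pvChunk, e1, e2, List.append_assoc]

-- ===== VERDICT =====
theorem parse_standard_tasks_py_spec : Claim_equal_parse_standard_tasks_py := by
  intro tasks_text _
  unfold Spec_parse_standard_tasks_py
  show parse_standard_tasks_py tasks_text = parse_standard_tasks_py_alt tasks_text
  simp only [parse_standard_tasks_py, parse_standard_tasks_py_alt]
  have hdata := pvFoldA_empty ((PySem.Str.split? (PySem.Str.strip tasks_text) "\n").getD []) []
  simp only [pvFin, List.nil_append] at hdata
  rw [hdata, pvBullets, pvEmptyAppend]
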